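-- pv_equiv track=rewrite | github.com/jolietjakeblues/python | net_extract_terms_spacy.py | herstel_samenstellingen
-- ===== SOURCE A (Python) =====
-- SAMENSTELLINGEN = [
--     ("begin", "jaartelling"),
--     ("eerste", "wereldoorlog"),
--     ("tweede", "kamer"),
--     ("koninklijk", "huis"),
--     ("oude", "rijksdaggebouw"),
-- ]
--
-- def herstel_samenstellingen(nomenlijst):
--     woorden = nomenlijst.split("|")
--     i = 0
--     resultaat = []
--     while i < len(woorden):
--         if i < len(woorden) - 1 and (woorden[i], woorden[i + 1]) in SAMENSTELLINGEN:
--             resultaat.append(f"{woorden[i]} {woorden[i + 1]}")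
--             i += 2
--         else:
--             resultaat.append(woorden[i])
--             i += 1
--     return "|".join(resultaat)
-- ===== SOURCE B (Python) =====
-- SAMENSTELLINGEN = [
--     ("begin", "jaartelling"),
--     ("eerste", "wereldoorlog"),
--     ("tweede", "kamer"),
--     ("koninklijk", "huis"),
--     ("oude", "rijksdaggebouw"),
-- ]
--
--
-- def _match_pat(pat, s, pos):
--     # s has pat at pos, followed by '|' or the end of s -> position after pat, else None
--     if s.startswith(pat, pos) and (pos + len(pat) == len(s) or s[pos + len(pat)] == "|"):
--         return pos + len(pat)
--     return None
--
--
-- def herstel_samenstellingen(nomenlijst):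
--     # single left-to-right scan of the pipe-joined STRING itself (no split into a word
--     # list): at each token start, try the five "w1|w2" patterns with a token boundary
--     # after them; on a hit emit "w1 w2", otherwise copy the token up to the next '|'.
--     s = nomenlijst
--     out = []
--     pos = 0
--     while True:
--         end = None
--         for w1, w2 in SAMENSTELLINGEN:
--             end = _match_pat(w1 + "|" + w2, s, pos)
--             if end is not None:
--                 out.append(w1 + " " + w2)
--                 break
--         if end is None:
--             j = s.find("|", pos)
--             if j == -1:
--                 out.append(s[pos:])
--                 return "|".join(out)
--             out.append(s[pos:j])
--             pos = j + 1
--         else: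
--             if end == len(s):
--                 return "|".join(out)
--             pos = end + 1
-- ===== Notes on version B (the rewrite author's own statement) =====
-- stated objective: alternative
-- what changed: Instead of splitting into a word list and running an indexed greedy merge loop over it, B rewrites the pipe-joined string directly: one left-to-right scan that matches the five known bigram patterns (first word, pipe, second word) at token boundaries, emitting the two words joined by a space, and otherwise copies the token up to the next pipe, never building the intermediate word list.
import Mathlib
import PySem

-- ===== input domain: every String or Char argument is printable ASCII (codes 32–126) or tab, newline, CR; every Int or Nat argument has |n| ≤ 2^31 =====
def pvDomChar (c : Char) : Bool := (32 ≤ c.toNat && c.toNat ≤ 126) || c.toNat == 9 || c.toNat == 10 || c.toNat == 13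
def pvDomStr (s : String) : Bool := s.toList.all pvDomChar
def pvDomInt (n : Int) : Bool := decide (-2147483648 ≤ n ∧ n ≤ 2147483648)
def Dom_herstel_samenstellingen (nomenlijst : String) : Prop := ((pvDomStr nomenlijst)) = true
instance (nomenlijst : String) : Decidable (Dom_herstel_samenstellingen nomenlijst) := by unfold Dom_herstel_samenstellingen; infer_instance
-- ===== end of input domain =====

-- B replaces A's split-into-words + indexed greedy merge loop by a single left-to-right
-- scan of the pipe-joined string itself, matching the five "w1|w2" patterns at token
-- boundaries (objective: alternative; same output, no intermediate word list).

-- ===== PORT A =====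
def SAMEN : List (String × String) :=
  [("begin", "jaartelling"), ("eerste", "wereldoorlog"), ("tweede", "kamer"),
   ("koninklijk", "huis"), ("oude", "rijksdaggebouw")]

-- the while-loop of A: index i over woorden, accumulating resultaat
def loopA (ws : List String) (i : Nat) (res : List String) : List String :=
  if _h : i < ws.length then
    if i < ws.length - 1 ∧ (ws.getD i "", ws.getD (i + 1) "") ∈ SAMEN then
      loopA ws (i + 2) (res ++ [ws.getD i "" ++ " " ++ ws.getD (i + 1) ""])
    else
      loopA ws (i + 1) (res ++ [ws.getD i ""])
  else res
termination_by ws.length - i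

def herstel_samenstellingen (nomenlijst : String) : String :=
  -- sep "|" is non-empty, so split? always returns some; getD [] only discharges the option
  PySem.Str.join "|" (loopA ((PySem.Str.split? nomenlijst "|").getD []) 0 [])

-- ===== PORT B =====
def SAMEN_B : List (String × String) :=
  [("begin", "jaartelling"), ("eerste", "wereldoorlog"), ("tweede", "kamer"),
   ("koninklijk", "huis"), ("oude", "rijksdaggebouw")]

-- Source B's _match_pat: the string has pat here followed by '|' or its end; the port works
-- on the remaining suffix (the Python keeps an increasing index pos into s, which is the
-- same data), returning the suffix after pat instead of the index end.
def matchPat : List Char → List Char → Option (List Char)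
  | [], rest => if rest = [] ∨ rest.head? = some '|' then some rest else none
  | _ :: _, [] => none
  | c :: p, d :: cs => if c = d then matchPat p cs else none

-- Source B's for-loop over SAMENSTELLINGEN: first pattern that matches at the current position
def tryAll : List (String × String) → List Char → Option (String × List Char)
  | [], _ => none
  | (w1, w2) :: ps, cs =>
      match matchPat (w1.toList ++ '|' :: w2.toList) cs with
      | some r => some (w1 ++ " " ++ w2, r)
      | none => tryAll ps cs

-- Source B's  j = s.find("|", pos)  plus the two slices s[pos:j] / s[pos:]:
-- the copied token and (if a '|' was found) the suffix after it
def splitBar : List Char → List Char × Option (List Char)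
  | [] => ([], none)
  | c :: cs =>
      if c = '|' then ([], some cs)
      else (c :: (splitBar cs).1, (splitBar cs).2)

theorem matchPat_some_len (p cs r : List Char) (h : matchPat p cs = some r) :
    cs.length = p.length + r.length := by
  induction p generalizing cs with
  | nil =>
      simp only [matchPat] at h
      split at h
      · cases h; simp
      · cases h
  | cons c p ih =>
      cases cs with
      | nil => simp [matchPat] at h
      | cons d cs =>
          simp only [matchPat] at h
          split at h
          · have := ih cs h; simp [this]; omega
          · cases h

theorem tryAll_some_len (ps : List (String × String)) (cs : List Char) (m : String)
    (r : List Char) (h : tryAll ps cs = some (m, r)) : r.length < cs.length := by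
  induction ps with
  | nil => simp [tryAll] at h
  | cons p ps ih =>
      obtain ⟨w1, w2⟩ := p
      simp only [tryAll] at h
      cases hm : matchPat (w1.toList ++ '|' :: w2.toList) cs with
      | some r' =>
          rw [hm] at h
          cases h
          have := matchPat_some_len _ _ _ hm
          simp at this; omega
      | none => rw [hm] at h; exact ih h

theorem splitBar_some_len (cs t r : List Char) (h : splitBar cs = (t, some r)) :
    r.length < cs.length := by
  induction cs generalizing t r with
  | nil => simp [splitBar] at h
  | cons c cs ih =>
      by_cases hc : c = '|'
      · simp only [splitBar, if_pos hc, Prod.mk.injEq] at h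
        obtain ⟨-, h2⟩ := h
        cases h2; simp
      · simp only [splitBar, if_neg hc, Prod.mk.injEq] at h
        obtain ⟨-, h2⟩ := h
        have := ih (splitBar cs).1 r (by rw [← h2])
        simp; omega

-- Source B's while-loop: pos-based scan of s, ported as recursion on the remaining suffix cs
def scanB (cs : List Char) (out : List String) : List String :=
  match h : tryAll SAMEN_B cs with
  | some (m, r) =>
      if hr : r = [] then out ++ [m]          -- end == len(s): return
      else scanB r.tail (out ++ [m])          -- pos = end + 1: skip the '|' after the match
  | none =>
      match hs : splitBar cs with
      | (t, none) => out ++ [String.ofList t] -- j == -1: append s[pos:], return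
      | (t, some r) => scanB r (out ++ [String.ofList t])
termination_by cs.length
decreasing_by
  · have h1 := tryAll_some_len _ _ _ _ h
    have : r.tail.length < r.length := by
      cases r with
      | nil => exact absurd rfl hr
      | cons a as => simp
    omega
  · exact splitBar_some_len _ _ _ hs

def herstel_samenstellingen_alt (nomenlijst : String) : String :=
  PySem.Str.join "|" (scanB nomenlijst.toList [])

-- ===== PRECONDITION & SPEC =====
def Spec_herstel_samenstellingen (nomenlijst : String) (out : String) : Prop := out = herstel_samenstellingen_alt nomenlijst
instance (nomenlijst : String) (out : String) : Decidable (Spec_herstel_samenstellingen nomenlijst out) := by unfold Spec_herstel_samenstellingen; infer_instance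

-- ===== CLAIM (what is proved, stated in full; the proofs are below) =====
def Claim_equal_herstel_samenstellingen : Prop := ∀ (nomenlijst : String), Dom_herstel_samenstellingen nomenlijst → Spec_herstel_samenstellingen nomenlijst (herstel_samenstellingen nomenlijst)

-- ===== LEMMAS AND PROOFS =====

-- structural reference version of A's greedy merge (proof-only)
def mergeR : List String → List String
  | [] => []
  | [a] => [a]
  | a :: b :: t =>
      if (a, b) ∈ SAMEN then (a ++ " " ++ b) :: mergeR t
      else a :: mergeR (b :: t)

set_option maxRecDepth 4096 in
theorem loopA_eq_mergeR (k : Nat) (ws : List String) (i : Nat) (res : List String)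
    (hk : ws.length - i ≤ k) : loopA ws i res = res ++ mergeR (ws.drop i) := by
  induction k generalizing i res with
  | zero =>
      rw [loopA, dif_neg (by omega), List.drop_eq_nil_of_le (by omega)]
      simp [mergeR]
  | succ k ih =>
      by_cases h : i < ws.length
      · have hd : ws.drop i = ws[i] :: ws.drop (i + 1) := List.drop_eq_getElem_cons h
        have hgi : ws.getD i "" = ws[i] := List.getD_eq_getElem ws "" h
        by_cases hc : i < ws.length - 1 ∧ (ws.getD i "", ws.getD (i + 1) "") ∈ SAMEN
        · have h1 : i + 1 < ws.length := by omega
          have hd1 : ws.drop (i + 1) = ws[i + 1] :: ws.drop (i + 2) := List.drop_eq_getElem_cons h1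
          have hgi1 : ws.getD (i + 1) "" = ws[i + 1] := List.getD_eq_getElem ws "" h1
          rw [loopA, dif_pos h, if_pos hc, ih _ _ (by omega), hd, hd1, mergeR]
          rw [hgi, hgi1] at hc ⊢
          rw [if_pos hc.2]
          simp
        · rw [loopA, dif_pos h, if_neg hc, ih _ _ (by omega), hd]
          rw [hgi] at hc ⊢
          rcases hdrop : ws.drop (i + 1) with _ | ⟨b, t⟩
          · have : ws.length ≤ i + 1 := by
              by_contra hlt
              rw [List.drop_eq_getElem_cons (by omega)] at hdrop
              exact List.cons_ne_nil _ _ hdrop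
            simp [mergeR]
          · have h1 : i + 1 < ws.length := by
              by_contra hge
              rw [List.drop_eq_nil_of_le (by omega)] at hdrop
              exact List.cons_ne_nil _ _ hdrop.symm
            have hb : ws[i + 1] = b := by
              have h' := List.drop_eq_getElem_cons h1
              rw [hdrop] at h'
              exact (List.cons_eq_cons.mp h').1.symm
            have hgi1 : ws.getD (i + 1) "" = ws[i + 1] := List.getD_eq_getElem ws "" h1
            have hnot : ¬ ((ws[i], b) ∈ SAMEN) := fun hm =>
              hc ⟨by omega, by rw [hgi1, hb]; exact hm⟩
            rw [mergeR, if_neg hnot]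
            simp
      · rw [loopA, dif_neg h, List.drop_eq_nil_of_le (by omega)]
        simp [mergeR]

-- token split of a string (proof-side model of Python's s.split("|"))
def mySplit (pre : List Char) : List Char → List (List Char)
  | [] => [pre]
  | c :: r => if c = '|' then pre :: mySplit [] r else mySplit (pre ++ [c]) r

theorem splitOn_go_eq (fuel : Nat) : ∀ (l cur : List Char) (accs : List (List Char)),
    l.length < fuel →
    PySem.Chars.splitOn.go ['|'] fuel l cur accs = accs.reverse ++ mySplit cur.reverse l := by
  induction fuel with
  | zero => intro l cur accs h; omega
  | succ f ih =>
    intro l cur accs h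
    cases l with
    | nil => rw [PySem.Chars.splitOn.go.eq_def]; simp [mySplit]
    | cons c rest =>
      rw [PySem.Chars.splitOn.go.eq_def]
      by_cases hc : c = '|'
      · have hp : List.isPrefixOf ['|'] (c :: rest) = true := by simp [List.isPrefixOf, hc]
        simp only [hp, if_true, List.length_cons, List.length_nil, List.drop_succ_cons,
          List.drop_zero]
        rw [ih rest [] (cur.reverse :: accs) (by simp at h ⊢; omega)]
        simp [mySplit, hc]
      · have hp : List.isPrefixOf ['|'] (c :: rest) = false := by
          simp [List.isPrefixOf]; exact fun hh => absurd hh.symm hc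
        simp only [hp, Bool.false_eq_true, if_false]
        rw [ih rest (c :: cur) accs (by simp at h ⊢; omega)]
        simp [mySplit, hc]

theorem mySplit_ne_nil (l pre : List Char) : mySplit pre l ≠ [] := by
  induction l generalizing pre with
  | nil => simp [mySplit]
  | cons c r ih =>
      simp only [mySplit]
      split
      · simp
      · exact ih _

theorem mySplit_nobar (l pre : List Char) (hp : '|' ∉ pre) :
    ∀ t ∈ mySplit pre l, '|' ∉ t := by
  induction l generalizing pre with
  | nil => simpa [mySplit] using hp
  | cons c r ih =>
      simp only [mySplit]
      split
      · intro t ht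
        rcases List.mem_cons.mp ht with h | h
        · subst h; exact hp
        · exact ih [] (by simp) t h
      · exact ih (pre ++ [c]) (by simp [hp]; rintro rfl; simp_all)

theorem mySplit_join (l pre : List Char) :
    PySem.Chars.join ['|'] (mySplit pre l) = pre ++ l := by
  induction l generalizing pre with
  | nil => simp [mySplit, PySem.Chars.join_singleton]
  | cons c r ih =>
      simp only [mySplit]
      split
      · rename_i hc
        subst hc
        rcases hms : mySplit [] r with _ | ⟨a, as⟩
        · exact absurd hms (mySplit_ne_nil r [])
        · rw [PySem.Chars.join_cons_cons, ← hms, ih []]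
          simp
      · rw [ih (pre ++ [c])]; simp

-- matchPat succeeds exactly on a prefix match with a token boundary after it
theorem matchPat_iff (p cs r : List Char) :
    matchPat p cs = some r ↔ cs = p ++ r ∧ (r = [] ∨ r.head? = some '|') := by
  induction p generalizing cs with
  | nil =>
      simp only [matchPat, List.nil_append]
      split
      · rename_i hb
        constructor
        · intro h; cases h; exact ⟨rfl, hb⟩
        · rintro ⟨rfl, -⟩; rfl
      · rename_i hb
        constructor
        · intro h; cases h
        · rintro ⟨rfl, hb'⟩; exact absurd hb' hb
  | cons c p ih =>
      cases cs with
      | nil => simp [matchPat]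
      | cons d cs =>
          simp only [matchPat, List.cons_append, List.cons_eq_cons]
          split
          · rename_i hd
            subst hd
            rw [ih]
            simp
          · rename_i hd
            constructor
            · intro h; cases h
            · rintro ⟨⟨h1, -⟩, -⟩; exact absurd h1.symm hd

-- a '|'-free segment before the first bar is unique
theorem bar_split_unique (a : List Char) : ∀ (b x y : List Char), '|' ∉ a → '|' ∉ b →
    a ++ '|' :: x = b ++ '|' :: y → a = b ∧ x = y := by
  induction a with
  | nil =>
      intro b x y _ hb h
      cases b with
      | nil => simpa using h
      | cons d b =>
          simp only [List.nil_append, List.cons_append, List.cons_eq_cons] at h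
          exact absurd (by rw [h.1]; exact List.mem_cons_self) hb
  | cons c a ih =>
      intro b x y ha hb h
      cases b with
      | nil =>
          simp only [List.cons_append, List.nil_append, List.cons_eq_cons] at h
          exact absurd (by rw [← h.1]; exact List.mem_cons_self) ha
      | cons d b =>
          simp only [List.cons_append, List.cons_eq_cons] at h
          obtain ⟨rfl, h2⟩ := h
          have := ih b x y (fun hm => ha (List.mem_cons_of_mem _ hm))
            (fun hm => hb (List.mem_cons_of_mem _ hm)) h2
          exact ⟨by rw [this.1], this.2⟩

-- the joined string after the first token: empty, or '|' followed by the rest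
def tailJ : List (List Char) → List Char
  | [] => []
  | a :: as => '|' :: PySem.Chars.join ['|'] (a :: as)

theorem jc_cons (a : List Char) (more : List (List Char)) :
    PySem.Chars.join ['|'] (a :: more) = a ++ tailJ more := by
  cases more with
  | nil => simp [tailJ, PySem.Chars.join_singleton]
  | cons b t => rw [PySem.Chars.join_cons_cons, tailJ]; simp

theorem tailJ_boundary (rcs : List (List Char)) :
    tailJ rcs = [] ∨ (tailJ rcs).head? = some '|' := by
  cases rcs with
  | nil => exact Or.inl rfl
  | cons a as => exact Or.inr rfl

theorem mt_pos (w1c w2c : List Char) (rcs : List (List Char)) :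
    matchPat (w1c ++ '|' :: w2c) (PySem.Chars.join ['|'] (w1c :: w2c :: rcs)) =
      some (tailJ rcs) := by
  rw [matchPat_iff]
  refine ⟨?_, tailJ_boundary rcs⟩
  rw [PySem.Chars.join_cons_cons, jc_cons w2c rcs]
  simp

theorem mt_neg (w1c w2c tc : List Char) (rcs : List (List Char))
    (hw1 : '|' ∉ w1c) (hw2 : '|' ∉ w2c) (ht : '|' ∉ tc)
    (hu : ∀ u ∈ rcs.head?, '|' ∉ u)
    (hne : ¬ (tc = w1c ∧ ∃ rcs', rcs = w2c :: rcs')) :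
    matchPat (w1c ++ '|' :: w2c) (PySem.Chars.join ['|'] (tc :: rcs)) = none := by
  cases hm : matchPat (w1c ++ '|' :: w2c) (PySem.Chars.join ['|'] (tc :: rcs)) with
  | none => rfl
  | some r =>
      exfalso
      obtain ⟨heq, hbnd⟩ := (matchPat_iff _ _ _).mp hm
      rw [jc_cons] at heq
      cases rcs with
      | nil =>
          simp only [tailJ, List.append_nil] at heq
          exact ht (by rw [heq]; simp)
      | cons u rcs' =>
          simp only [tailJ] at heq
          rw [jc_cons u rcs'] at heq
          have heq' : tc ++ '|' :: (u ++ tailJ rcs') = w1c ++ '|' :: (w2c ++ r) := by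
            simpa using heq
          obtain ⟨rfl, h2⟩ := bar_split_unique tc w1c _ _ ht hw1 heq'
          have hu' : '|' ∉ u := hu u (by simp)
          rcases hbnd with rfl | hh
          · -- r = []: u ++ tailJ rcs' = w2c, so rcs' must be empty and u = w2c
            simp only [List.append_nil] at h2
            cases rcs' with
            | nil =>
                simp only [tailJ, List.append_nil] at h2
                exact hne ⟨rfl, [], by rw [h2]⟩
            | cons v rcs'' =>
                exact hw2 (by rw [← h2]; simp [tailJ])
          · -- r starts with '|'
            cases r with
            | nil => simp at hh
            | cons rc r' =>
                have hrc : rc = '|' := by simpa using hh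
                subst hrc
                cases rcs' with
                | nil =>
                    simp only [tailJ, List.append_nil] at h2
                    exact hu' (by rw [h2]; simp)
                | cons v rcs'' =>
                    simp only [tailJ] at h2
                    obtain ⟨rfl, -⟩ := bar_split_unique u w2c _ _ hu' hw2 (by simpa using h2)
                    exact hne ⟨rfl, v :: rcs'', rfl⟩

-- string-token versions
def jn (ts : List String) : List Char := PySem.Chars.join ['|'] (ts.map String.toList)

theorem tryAll_mem (P : List (String × String)) (t u : String) (rest : List String)
    (hP : ∀ p ∈ P, '|' ∉ p.1.toList ∧ '|' ∉ p.2.toList)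
    (hmem : (t, u) ∈ P) :
    tryAll P (jn (t :: u :: rest)) = some (t ++ " " ++ u, tailJ (rest.map String.toList)) := by
  induction P with
  | nil => cases hmem
  | cons p ps ih =>
      obtain ⟨w1, w2⟩ := p
      by_cases hcase : t = w1 ∧ u = w2
      · obtain ⟨rfl, rfl⟩ := hcase
        simp only [tryAll, jn, List.map_cons]
        rw [mt_pos]
      · have hne : (t, u) ≠ (w1, w2) := by
          intro hh; exact hcase (by cases hh; exact ⟨rfl, rfl⟩)
        have hmem' : (t, u) ∈ ps := by
          rcases List.mem_cons.mp hmem with h | h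
          · exact absurd h hne
          · exact h
        have hw := hP (w1, w2) List.mem_cons_self
        have ht' : '|' ∉ t.toList := (hP (t, u) hmem).1
        have hu' : '|' ∉ u.toList := (hP (t, u) hmem).2
        simp only [tryAll, jn, List.map_cons]
        rw [mt_neg w1.toList w2.toList t.toList (u.toList :: rest.map String.toList)
          hw.1 hw.2 ht' (by intro x hx; simp at hx; rw [← hx]; exact hu')
          (by rintro ⟨h1, rcs', h2⟩
              apply hcase
              refine ⟨String.toList_inj.mp h1, String.toList_inj.mp ?_⟩
              simpa using congrArg List.head? h2)]
        exact ih (fun p hp => hP p (List.mem_cons_of_mem _ hp)) hmem'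

theorem tryAll_none (P : List (String × String)) (t : String) (rest : List String)
    (hP : ∀ p ∈ P, '|' ∉ p.1.toList ∧ '|' ∉ p.2.toList)
    (ht : '|' ∉ t.toList) (hrest : ∀ u ∈ rest, '|' ∉ u.toList)
    (hno : ∀ u rest', rest = u :: rest' → (t, u) ∉ P) :
    tryAll P (jn (t :: rest)) = none := by
  induction P with
  | nil => rfl
  | cons p ps ih =>
      obtain ⟨w1, w2⟩ := p
      have hw := hP (w1, w2) List.mem_cons_self
      simp only [tryAll, jn, List.map_cons]
      rw [mt_neg w1.toList w2.toList t.toList (rest.map String.toList) hw.1 hw.2 ht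
        (by intro x hx
            cases rest with
            | nil => simp at hx
            | cons u rest' =>
                simp at hx
                rw [← hx]
                exact hrest u List.mem_cons_self)
        (by rintro ⟨h1, rcs', h2⟩
            cases rest with
            | nil => simp at h2
            | cons u rest' =>
                simp only [List.map_cons, List.cons_eq_cons] at h2
                exact hno u rest' rfl (by
                  rw [String.toList_inj.mp h1, ← String.toList_inj.mp h2.1]
                  exact List.mem_cons_self))]
      exact ih (fun p hp => hP p (List.mem_cons_of_mem _ hp))
        (fun u rest' h hm => hno u rest' h (List.mem_cons_of_mem _ hm))

theorem sb_nobar (tc : List Char) (ht : '|' ∉ tc) : splitBar tc = (tc, none) := by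
  induction tc with
  | nil => rfl
  | cons c cs ih =>
      have hc : c ≠ '|' := fun hh => ht (by rw [hh]; exact List.mem_cons_self)
      rw [splitBar, if_neg hc, ih (fun hm => ht (List.mem_cons_of_mem _ hm))]

theorem sb_bar (tc : List Char) (rest : List Char) (ht : '|' ∉ tc) :
    splitBar (tc ++ '|' :: rest) = (tc, some rest) := by
  induction tc with
  | nil => simp [splitBar]
  | cons c cs ih =>
      have hc : c ≠ '|' := fun hh => ht (by rw [hh]; exact List.mem_cons_self)
      rw [List.cons_append, splitBar, if_neg hc, ih (fun hm => ht (List.mem_cons_of_mem _ hm))]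

theorem hP_SAMEN_B : ∀ p ∈ SAMEN_B, '|' ∉ p.1.toList ∧ '|' ∉ p.2.toList := by decide

theorem scanB_some (cs : List Char) (out : List String) (m : String) (r : List Char)
    (h : tryAll SAMEN_B cs = some (m, r)) :
    scanB cs out = if r = [] then out ++ [m] else scanB r.tail (out ++ [m]) := by
  rw [scanB]
  split
  · rename_i m' r' heq
    rw [h] at heq
    cases heq
    simp
  · rename_i heq
    rw [h] at heq
    cases heq

theorem scanB_none_end (cs : List Char) (out : List String) (t : List Char)
    (h : tryAll SAMEN_B cs = none) (hs : splitBar cs = (t, none)) :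
    scanB cs out = out ++ [String.ofList t] := by
  rw [scanB]
  split
  · rename_i m' r' heq
    rw [h] at heq
    cases heq
  · split
    · rename_i t' heq
      rw [hs] at heq
      cases heq
      rfl
    · rename_i t' r' heq
      rw [hs] at heq
      cases heq

theorem scanB_none_bar (cs : List Char) (out : List String) (t r : List Char)
    (h : tryAll SAMEN_B cs = none) (hs : splitBar cs = (t, some r)) :
    scanB cs out = scanB r (out ++ [String.ofList t]) := by
  rw [scanB]
  split
  · rename_i m' r' heq
    rw [h] at heq
    cases heq
  · split
    · rename_i t' heq
      rw [hs] at heq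
      cases heq
    · rename_i t' r' heq
      rw [hs] at heq
      cases heq
      rfl

-- the scan of the joined string computes the greedy merge of the token list
theorem scanB_merge (n : Nat) : ∀ (ts : List String) (out : List String),
    ts.length ≤ n → ts ≠ [] → (∀ t ∈ ts, '|' ∉ t.toList) →
    scanB (jn ts) out = out ++ mergeR ts := by
  induction n with
  | zero =>
      intro ts out h hne _
      cases ts with
      | nil => exact absurd rfl hne
      | cons a b => simp at h
  | succ n ih =>
    rintro (_ | ⟨t, rest⟩) out hlen hne hbar
    · exact absurd rfl hne
    cases rest with
    | nil =>
        have htr : tryAll SAMEN_B (jn [t]) = none :=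
          tryAll_none SAMEN_B t [] hP_SAMEN_B (hbar t List.mem_cons_self)
            (by intro u hu; cases hu) (by intro u rest' h; cases h)
        have hjn : jn [t] = t.toList := by simp [jn, PySem.Chars.join_singleton]
        rw [scanB_none_end _ _ _ htr (by rw [hjn]; exact sb_nobar t.toList (hbar t List.mem_cons_self))]
        simp [mergeR, String.ofList_toList]
    | cons u rest' =>
        by_cases hm : (t, u) ∈ SAMEN
        · have hmB : (t, u) ∈ SAMEN_B := hm
          have htr := tryAll_mem SAMEN_B t u rest' hP_SAMEN_B hmB
          rw [scanB_some _ _ _ _ htr]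
          cases rest' with
          | nil =>
              rw [mergeR, if_pos hm]
              simp [tailJ, mergeR]
          | cons v rest'' =>
              have htj : tailJ ((v :: rest'').map String.toList) =
                  '|' :: jn (v :: rest'') := by simp [tailJ, jn]
              rw [htj, if_neg (by simp : ('|' :: jn (v :: rest'') : List Char) ≠ [])]
              simp only [List.tail_cons]
              rw [ih (v :: rest'') (out ++ [t ++ " " ++ u]) (by simp at hlen ⊢; omega)
                (by simp) (fun w hw => hbar w (List.mem_cons_of_mem _ (List.mem_cons_of_mem _ hw)))]
              rw [mergeR, if_pos hm]
              simp
        · have hnoB : ∀ w rest₀, (u :: rest') = w :: rest₀ → (t, w) ∉ SAMEN_B := by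
            rintro w rest₀ ⟨rfl, rfl⟩
            exact hm
          have htr : tryAll SAMEN_B (jn (t :: u :: rest')) = none :=
            tryAll_none SAMEN_B t (u :: rest') hP_SAMEN_B
              (hbar t List.mem_cons_self)
              (fun w hw => hbar w (List.mem_cons_of_mem _ hw)) hnoB
          have hjn : jn (t :: u :: rest') = t.toList ++ '|' :: jn (u :: rest') := by
            simp only [jn, List.map_cons]
            rw [jc_cons]
            simp [tailJ, jn]
          rw [scanB_none_bar _ _ _ _ htr
            (by rw [hjn]; exact sb_bar t.toList _ (hbar t List.mem_cons_self))]
          rw [ih (u :: rest') (out ++ [String.ofList t.toList]) (by simp at hlen ⊢; omega)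
            (by simp) (fun w hw => hbar w (List.mem_cons_of_mem _ hw))]
          rw [mergeR, if_neg hm]
          simp [String.ofList_toList]

-- ===== VERDICT (by name: the statement is the Claim_ definition above) =====
theorem split_eq_mySplit (s : String) :
    (PySem.Str.split? s "|").getD [] = (mySplit [] s.toList).map String.ofList := by
  have hsep : ("|" : String).toList = ['|'] := by decide
  rw [PySem.Str.split?, hsep, PySem.Chars.split?, if_neg (by simp)]
  rw [PySem.Chars.splitOn, splitOn_go_eq (s.toList.length + 1) s.toList [] []
    (by omega)]
  simp

theorem herstel_samenstellingen_spec : Claim_equal_herstel_samenstellingen := by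
  intro s _
  unfold Spec_herstel_samenstellingen herstel_samenstellingen herstel_samenstellingen_alt
  rw [split_eq_mySplit s]
  set ts : List String := (mySplit [] s.toList).map String.ofList with hts
  rw [loopA_eq_mergeR ts.length ts 0 [] (by omega)]
  have hjn : jn ts = s.toList := by
    rw [hts, jn, List.map_map]
    have h2 : ((mySplit [] s.toList).map (String.toList ∘ String.ofList)) =
        mySplit [] s.toList := by
      simp only [Function.comp_def, String.toList_ofList, List.map_id']
    rw [h2, mySplit_join]
    rfl
  rw [← hjn]
  rw [scanB_merge ts.length ts [] le_rfl
    (by rw [hts]; simp [mySplit_ne_nil])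
    (by
      rw [hts]
      intro t ht
      simp only [List.mem_map] at ht
      obtain ⟨tc, htc, rfl⟩ := ht
      rw [String.toList_ofList]
      exact mySplit_nobar s.toList [] (by simp) tc htc)]
  simp only [List.drop_zero]
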